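-- pv_equiv track=rewrite | github.com/Hyeeein/CodingTest | 프로그래머스/1/42840. 모의고사/모의고사.py | solution
-- ===== SOURCE A (Python) =====
-- def solution(answers):
--     answer = []
--
--     # 수포자 답안
--     person_1 = [1, 2, 3, 4, 5]
--     person_2 = [2, 1, 2, 3, 2, 4, 2, 5]
--     person_3 = [3, 3, 1, 1, 2, 2, 4, 4, 5, 5]
--
--     # 맞은 개수 count
--     one_count = 0 ; two_count = 0 ; three_count = 0
--
--     # 수포자 답안을 answers 개수만큼 만들기 (문제보다 짧은 경우만)
--     answers_len = len(answers)
--     num_1, num_2, num_3 = 0, 0, 0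
--
--     if len(person_1) < answers_len:
--         num_1 = person_1 * ((answers_len // len(person_1)) + (answers_len % len(person_1)))
--     else:
--         num_1 = person_1[:answers_len]
--
--     if len(person_2) < answers_len:
--         num_2 = person_2 * ((answers_len // len(person_2)) + (answers_len % len(person_2)))
--     else:
--         num_2 = person_2[:answers_len]
--
--     if len(person_3) < answers_len:
--         num_3 = person_3 * ((answers_len // len(person_3)) + (answers_len % len(person_3)))
--     else:
--         num_3 = person_3[:answers_len]
--
--     for i in range(answers_len):
--         if num_1[i] == answers[i]: one_count += 1
--         if num_2[i] == answers[i]: two_count += 1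
--         if num_3[i] == answers[i]: three_count += 1
--
--     max_count = max(one_count, two_count, three_count)
--     if one_count == max_count: answer.append(1)
--     if two_count == max_count: answer.append(2)
--     if three_count == max_count: answer.append(3)
--
--     return answer
-- ===== SOURCE B (Python) =====
-- def solution(answers):
--     PERIOD = 40  # lcm of the three pattern lengths (5, 8, 10)
--     # one pass: frequency table of (position mod 40, answer) pairs
--     freq = {}
--     for i, a in enumerate(answers):
--         key = (i % PERIOD, a)
--         freq[key] = freq.get(key, 0) + 1
--     patterns = [[1, 2, 3, 4, 5],
--                 [2, 1, 2, 3, 2, 4, 2, 5],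
--                 [3, 3, 1, 1, 2, 2, 4, 4, 5, 5]]
--     # score each pattern by 40 table lookups (no scan over answers)
--     scores = [sum(freq.get((r, p[r % len(p)]), 0) for r in range(PERIOD))
--               for p in patterns]
--     best = max(scores)
--     return [i + 1 for i, s in enumerate(scores) if s == best]
-- ===== Notes on version B (the rewrite author's own statement) =====
-- stated objective: alternative
-- what changed: B makes one pass building a frequency dictionary keyed by (position mod 40, answer) (40 = lcm of the pattern lengths), then scores each pattern by 40 dictionary lookups instead of A's replicate-the-pattern tables and per-position comparison loop; the result list comes from a comprehension over the three scores.
import Mathlib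
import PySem

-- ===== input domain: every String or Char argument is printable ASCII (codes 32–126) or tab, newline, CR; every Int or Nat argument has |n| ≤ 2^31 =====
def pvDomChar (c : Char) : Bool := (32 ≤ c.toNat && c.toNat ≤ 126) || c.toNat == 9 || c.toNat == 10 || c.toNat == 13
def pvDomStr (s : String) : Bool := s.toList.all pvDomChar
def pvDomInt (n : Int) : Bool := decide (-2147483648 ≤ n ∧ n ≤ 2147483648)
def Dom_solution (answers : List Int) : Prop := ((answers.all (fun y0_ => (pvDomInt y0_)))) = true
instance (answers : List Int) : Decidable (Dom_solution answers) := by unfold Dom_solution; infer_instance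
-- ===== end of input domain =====

-- B builds a (position mod 40, answer) frequency dictionary in one pass and scores each pattern by 40 lookups,
-- instead of A's replicated full-length tables and per-position comparison loop; objective: alternative.

-- ===== PORT A =====
-- Python '//' and '%' act here on nonnegative ints (lengths), where Nat '/' and '%' are exact.
-- 'list * k' is (List.replicate k _).flatten; num_k[i] / answers[i] are in range, ported with pyGetD.
def solution (answers : List Int) : List Int :=
  let person1 : List Int := [1, 2, 3, 4, 5]
  let person2 : List Int := [2, 1, 2, 3, 2, 4, 2, 5]
  let person3 : List Int := [3, 3, 1, 1, 2, 2, 4, 4, 5, 5]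
  let answersLen := answers.length
  let num1 : List Int :=
    if person1.length < answersLen then
      (List.replicate (answersLen / person1.length + answersLen % person1.length) person1).flatten
    else person1.take answersLen
  let num2 : List Int :=
    if person2.length < answersLen then
      (List.replicate (answersLen / person2.length + answersLen % person2.length) person2).flatten
    else person2.take answersLen
  let num3 : List Int :=
    if person3.length < answersLen then
      (List.replicate (answersLen / person3.length + answersLen % person3.length) person3).flatten
    else person3.take answersLen
  let counts : Int × Int × Int :=
    (List.range answersLen).foldl (fun (c : Int × Int × Int) (i : Nat) =>
      ((if PySem.List.pyGetD num1 (i : Int) 0 = PySem.List.pyGetD answers (i : Int) 0 then c.1 + 1 else c.1),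
       (if PySem.List.pyGetD num2 (i : Int) 0 = PySem.List.pyGetD answers (i : Int) 0 then c.2.1 + 1 else c.2.1),
       (if PySem.List.pyGetD num3 (i : Int) 0 = PySem.List.pyGetD answers (i : Int) 0 then c.2.2 + 1 else c.2.2)))
      (0, 0, 0)
  let maxCount := max counts.1 (max counts.2.1 counts.2.2)
  (if counts.1 = maxCount then [1] else []) ++
  (if counts.2.1 = maxCount then [2] else []) ++
  (if counts.2.2 = maxCount then [3] else [])

-- ===== PORT B =====
-- freq[key] = freq.get(key, 0) + 1 over enumerate(answers), key = (i % 40, a); then 40 lookups per pattern.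
def solution_alt (answers : List Int) : List Int :=
  let period : Int := 40
  let freq : PySem.Dict (Int × Int) Int :=
    (PySem.List.enumerate answers).foldl
      (fun d ia => d.insert (PySem.Int.mod ia.1 period, ia.2)
                      (d.getD (PySem.Int.mod ia.1 period, ia.2) 0 + 1))
      PySem.Dict.empty
  let patterns : List (List Int) :=
    [[1, 2, 3, 4, 5], [2, 1, 2, 3, 2, 4, 2, 5], [3, 3, 1, 1, 2, 2, 4, 4, 5, 5]]
  let scores : List Int := patterns.map (fun p =>
    ((PySem.List.pyRange 0 period).map
        (fun r => freq.getD (r, PySem.List.pyGetD p (PySem.Int.mod r (p.length : Int)) 0) 0)).sum)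
  let best : Int := (PySem.List.max? scores (fun s => s)).getD 0   -- max of a (nonempty) literal triple
  ((PySem.List.enumerate scores).filter (fun is => is.2 = best)).map (fun is => is.1 + 1)

-- ===== PRECONDITION & SPEC =====
def Spec_solution (answers : List Int) (out : List Int) : Prop := out = solution_alt answers
instance (answers : List Int) (out : List Int) : Decidable (Spec_solution answers out) := by unfold Spec_solution; infer_instance

-- ===== CLAIM (what is proved, stated in full; the proofs are below) =====
def Claim_equal_solution : Prop := ∀ (answers : List Int), Dom_solution answers → Spec_solution answers (solution answers)

-- ===== LEMMAS AND PROOFS =====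

-- proof-only shorthand for A's replicated/truncated table (reducible: rw sees through it)
abbrev tblA (p : List Int) (n : Nat) : List Int :=
  if p.length < n then (List.replicate (n / p.length + n % p.length) p).flatten
  else List.take n p

-- getD of m concatenated copies of p cycles through p
lemma flat_getD (p : List Int) :
    ∀ (m i : Nat), i < p.length * m →
      ((List.replicate m p).flatten).getD i 0 = p.getD (i % p.length) 0 := by
  intro m
  induction m with
  | zero => intro i hi; omega
  | succ k ih =>
    intro i hi
    rw [List.replicate_succ, List.flatten_cons]
    by_cases h : i < p.length
    · rw [List.getD_eq_getElem?_getD, List.getElem?_append_left h,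
        ← List.getD_eq_getElem?_getD, Nat.mod_eq_of_lt h]
    · push_neg at h
      have hmul : p.length * (k + 1) = p.length * k + p.length := by ring
      rw [List.getD_eq_getElem?_getD, List.getElem?_append_right h,
        ← List.getD_eq_getElem?_getD, ih (i - p.length) (by omega)]
      congr 1
      conv_rhs => rw [show i = p.length + (i - p.length) from by omega, Nat.add_mod_left]

-- A's table, read at i < n, is the pattern read cyclically
lemma table_getD (p : List Int) (hL : 0 < p.length) (n i : Nat) (hi : i < n) :
    PySem.List.pyGetD (tblA p n) (i : Int) 0 = p.getD (i % p.length) 0 := by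
  rw [PySem.List.pyGetD_natCast]
  unfold tblA
  by_cases h : p.length < n
  · rw [if_pos h]
    apply flat_getD p
    have h1 : p.length * (n / p.length) + n % p.length = n := Nat.div_add_mod n p.length
    have h2 : n % p.length ≤ p.length * (n % p.length) := Nat.le_mul_of_pos_left _ hL
    calc i < n := hi
      _ ≤ p.length * (n / p.length) + p.length * (n % p.length) := by omega
      _ = p.length * (n / p.length + n % p.length) := by ring
  · rw [if_neg h]
    push_neg at h
    have hip : i < p.length := lt_of_lt_of_le hi h
    rw [Nat.mod_eq_of_lt hip, List.getD_eq_getElem?_getD, List.getElem?_take_of_lt hi,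
      ← List.getD_eq_getElem?_getD]

-- enumerate as a map over range
lemma enum_eq (answers : List Int) :
    ∀ (s : Int), PySem.List.enumerate answers s =
      (List.range answers.length).map (fun (k : Nat) => ((s + (k : Int)), answers.getD k 0)) := by
  induction answers with
  | nil => intro s; simp [PySem.List.enumerate]
  | cons a t ih =>
    intro s
    rw [PySem.List.enumerate_cons, ih (s + 1), List.length_cons, List.range_succ_eq_map,
      List.map_cons, List.map_map]
    simp only [Nat.cast_zero, add_zero, List.getD_cons_zero]
    congr 1
    apply List.map_congr_left
    intro k _
    simp only [Function.comp_apply, List.getD_cons_succ]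
    congr 1
    push_cast
    ring

-- indicator sum over a nodup list of residues: only the residue x.1 can contribute
lemma sum_ind (g : Nat → Int) (x : Int × Int) (m : Nat) (hx : x.1 = (m : Int)) :
    ∀ (R : List Nat), R.Nodup → m ∈ R →
      (R.map (fun (r : Nat) => if (x == (((r : Int)), g r)) = true then (1 : Int) else 0)).sum =
        if x.2 = g m then 1 else 0 := by
  intro R
  induction R with
  | nil => intro _ h; cases h
  | cons r R' ih =>
    intro hnd hm
    rw [List.map_cons, List.sum_cons]
    rcases List.nodup_cons.mp hnd with ⟨hrR, hnd'⟩
    by_cases hrm : r = m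
    · subst hrm
      have hzero : (R'.map (fun (r' : Nat) => if (x == (((r' : Int)), g r')) = true then (1 : Int) else 0)).sum = 0 := by
        apply List.sum_eq_zero
        intro y hy
        rcases List.mem_map.mp hy with ⟨r', hr', hval⟩
        have hne : (x == (((r' : Int)), g r')) = false := by
          apply beq_eq_false_iff_ne.mpr
          intro hEq
          apply hrR
          have h1 : x.1 = (r' : Int) := congrArg Prod.fst hEq
          rw [hx] at h1
          have h2 : r = r' := Nat.cast_injective h1
          rwa [← h2] at hr'
        rw [hne] at hval
        simp at hval
        omega
      rw [hzero, add_zero]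
      by_cases hv : x.2 = g r
      · have : (x == (((r : Int)), g r)) = true := by
          apply beq_iff_eq.mpr
          exact Prod.ext hx hv
        rw [this, if_pos hv]
        rfl
      · have : (x == (((r : Int)), g r)) = false := by
          apply beq_eq_false_iff_ne.mpr
          intro hEq
          exact hv (congrArg Prod.snd hEq)
        rw [this, if_neg hv]
        simp
    · have hm' : m ∈ R' := by
        cases hm with
        | head => exact absurd rfl hrm
        | tail _ h => exact h
      have hhead : (x == (((r : Int)), g r)) = false := by
        apply beq_eq_false_iff_ne.mpr
        intro hEq
        apply hrm
        have h1 : x.1 = (r : Int) := congrArg Prod.fst hEq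
        rw [hx] at h1
        exact (Nat.cast_injective h1).symm
      rw [hhead, ih hnd' hm']
      simp

-- summing per-residue pair counts over all residues counts every matching position once
lemma sum_count_pairs (g : Nat → Int) :
    ∀ (l : List (Int × Int)) (R : List Nat), R.Nodup →
      (∀ x ∈ l, ∃ m ∈ R, x.1 = (m : Int)) →
      (R.map (fun (r : Nat) => (l.count ((((r : Int)), g r)) : Int))).sum =
        (l.countP (fun x => x.2 = g x.1.toNat) : Int) := by
  intro l
  induction l with
  | nil => intro R _ _; simp
  | cons x t ih =>
    intro R hnd hmem
    rcases hmem x List.mem_cons_self with ⟨m, hmR, hxm⟩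
    have hcnt : ∀ r : Nat, ((x :: t).count (((r : Int), g r)) : Int) =
        (t.count (((r : Int), g r)) : Int) +
          (if (x == (((r : Int)), g r)) = true then (1 : Int) else 0) := by
      intro r
      rw [List.count_cons]
      push_cast
      split_ifs <;> simp
    rw [List.map_congr_left (fun r _ => hcnt r), PySem.List.sum_map_add_int,
      ih R hnd (fun y hy => hmem y (List.mem_cons_of_mem x hy)),
      sum_ind g x m hxm R hnd hmR]
    rw [List.countP_cons]
    have hx1 : x.1.toNat = m := by rw [hxm]; exact Int.toNat_natCast m
    by_cases hv : x.2 = g m <;> simp [hx1, hv]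

-- proof-only name for the key list B's dictionary counts
abbrev keysK (answers : List Int) : List (Int × Int) :=
  (List.range answers.length).map
    (fun i => (((i % 40 : Nat) : Int), answers.getD i 0))

-- B's frequency dictionary is the counter of keysK
lemma freq_eq_counter (answers : List Int) :
    (PySem.List.enumerate answers).foldl
      (fun d ia => d.insert (PySem.Int.mod ia.1 40, ia.2)
                      (d.getD (PySem.Int.mod ia.1 40, ia.2) 0 + 1))
      PySem.Dict.empty = PySem.Dict.counter (keysK answers) := by
  have hmap : (PySem.List.enumerate answers).map
      (fun ia : Int × Int => (PySem.Int.mod ia.1 40, ia.2)) = keysK answers := by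
    rw [enum_eq answers 0, List.map_map]
    apply List.map_congr_left
    intro k _
    simp only [Function.comp_apply, zero_add]
    rw [show ((40 : Int)) = ((40 : Nat) : Int) from rfl, PySem.Int.mod_natCast]
  rw [← PySem.Dict.foldl_insert_getD_add_one_eq_counter, ← hmap, List.foldl_map]

-- B's 40-lookup score for a pattern equals A's per-index match count over the table
lemma score_eq (answers p : List Int) (hL : 0 < p.length) (hdvd : p.length ∣ 40) :
    ((PySem.List.pyRange 0 40).map
        (fun r => (PySem.Dict.counter (keysK answers)).getD
            (r, PySem.List.pyGetD p (PySem.Int.mod r (p.length : Int)) 0) 0)).sum =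
      ((List.range answers.length).countP (fun (i : Nat) =>
        PySem.List.pyGetD (tblA p answers.length) (i : Int) 0 =
          PySem.List.pyGetD answers (i : Int) 0) : Int) := by
  rw [show ((40 : Int)) = ((40 : Nat) : Int) from rfl, PySem.List.pyRange_zero_natCast,
    List.map_map]
  have hterm : ∀ m ∈ List.range 40,
      ((fun r => (PySem.Dict.counter (keysK answers)).getD
            (r, PySem.List.pyGetD p (PySem.Int.mod r (p.length : Int)) 0) 0) ∘
        (fun k : Nat => (k : Int))) m =
      ((keysK answers).count (((m : Int), p.getD (m % p.length) 0)) : Int) := by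
    intro m _
    simp only [Function.comp_apply]
    rw [PySem.Int.mod_natCast, PySem.List.pyGetD_natCast, PySem.Dict.getD_counter]
  rw [List.map_congr_left hterm,
    sum_count_pairs (fun m => p.getD (m % p.length) 0) (keysK answers) (List.range 40)
      (List.nodup_range)
      (by
        intro x hx
        rcases List.mem_map.mp hx with ⟨i, _, hval⟩
        exact ⟨i % 40, List.mem_range.mpr (Nat.mod_lt i (by norm_num)), by rw [← hval]⟩)]
  unfold keysK
  rw [List.countP_map]
  congr 1
  apply List.countP_congr
  intro i hi
  rw [List.mem_range] at hi
  simp only [Function.comp_apply, Int.toNat_natCast, decide_eq_true_eq]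
  rw [table_getD p hL answers.length i hi, PySem.List.pyGetD_natCast answers,
    Nat.mod_mod_of_dvd i hdvd]
  exact eq_comm

-- the final selection step on three scores
lemma final3 (a b c : Int) :
    (if a = max a (max b c) then [1] else []) ++
    (if b = max a (max b c) then [2] else []) ++
    (if c = max a (max b c) then [3] else []) =
    ((PySem.List.enumerate [a, b, c]).filter
        (fun is => is.2 = (PySem.List.max? [a, b, c] (fun s => s)).getD 0)).map
      (fun is => is.1 + 1) := by
  simp only [PySem.List.enumerate_cons, PySem.List.enumerate_nil, PySem.List.max?, List.foldl,
    List.filter_cons, List.filter_nil]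
  norm_num
  by_cases h1 : a < b <;> by_cases h2 : b < c <;> by_cases h3 : a < c <;>
    simp only [h1, h2, h3, if_true, if_false, Option.getD_some] <;>
    split_ifs <;> first | omega | simp

-- bridge: A's Prop-conditioned counting fold as countP (cites PySem.List.foldl_count_if)
lemma foldl_count_if_prop {a : Type} (p : a → Prop) [DecidablePred p] (l : List a) (z : Int) :
    List.foldl (fun acc x => if p x then acc + 1 else acc) z l =
      z + ((l.countP (fun x => decide (p x)) : Nat) : Int) := by
  rw [← PySem.List.foldl_count_if (fun x => decide (p x)) l z]
  simp

theorem solution_eq_alt (answers : List Int) : solution answers = solution_alt answers := by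
  simp only [solution, solution_alt, List.map_cons, List.map_nil]
  rw [PySem.List.foldl_prod_mk
      (fun (s : Int) (i : Nat) =>
        if PySem.List.pyGetD (tblA [1, 2, 3, 4, 5] answers.length) (i : Int) 0 =
            PySem.List.pyGetD answers (i : Int) 0 then s + 1 else s)
      (fun (s : Int × Int) (i : Nat) =>
        ((if PySem.List.pyGetD (tblA [2, 1, 2, 3, 2, 4, 2, 5] answers.length) (i : Int) 0 =
            PySem.List.pyGetD answers (i : Int) 0 then s.1 + 1 else s.1),
         (if PySem.List.pyGetD (tblA [3, 3, 1, 1, 2, 2, 4, 4, 5, 5] answers.length) (i : Int) 0 =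
            PySem.List.pyGetD answers (i : Int) 0 then s.2 + 1 else s.2)))
      (List.range answers.length) 0 (0, 0),
    PySem.List.foldl_prod_mk
      (fun (s : Int) (i : Nat) =>
        if PySem.List.pyGetD (tblA [2, 1, 2, 3, 2, 4, 2, 5] answers.length) (i : Int) 0 =
            PySem.List.pyGetD answers (i : Int) 0 then s + 1 else s)
      (fun (s : Int) (i : Nat) =>
        if PySem.List.pyGetD (tblA [3, 3, 1, 1, 2, 2, 4, 4, 5, 5] answers.length) (i : Int) 0 =
            PySem.List.pyGetD answers (i : Int) 0 then s + 1 else s)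
      (List.range answers.length) 0 0]
  rw [foldl_count_if_prop, foldl_count_if_prop, foldl_count_if_prop]
  simp only [zero_add]
  simp only [freq_eq_counter answers]
  simp only [score_eq answers [1, 2, 3, 4, 5] (by decide) (by decide),
    score_eq answers [2, 1, 2, 3, 2, 4, 2, 5] (by decide) (by decide),
    score_eq answers [3, 3, 1, 1, 2, 2, 4, 4, 5, 5] (by decide) (by decide)]
  exact final3 _ _ _

-- ===== VERDICT (by name: the statement is the Claim_ definition above) =====
theorem solution_spec : Claim_equal_solution := by
  intro answers _
  unfold Spec_solution
  exact solution_eq_alt answers
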